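-- pv_equiv track=rewrite | github.com/dchriscothern/waims-python | test_waims.py | _parse
-- ===== SOURCE A (Python) =====
-- def _parse(text):
--     """Replicate parse_query logic from dashboard.py"""
--     text = text.lower().strip()
--     if any(w in text for w in ["poor sleep", "bad sleep", "tired", "sleep"]):
--         return "poor_sleep"
--     elif any(w in text for w in ["high risk", "at risk", "injury risk"]):
--         return "high_risk"
--     elif any(w in text for w in ["readiness", "ready"]):
--         return "readiness"
--     elif "compare position" in text or "position comparison" in text:
--         return "position_comparison"
--     elif any(w in text for w in ["back to back", "back-to-back", "b2b", "schedule", "rest"]):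
--         return "back_to_back"
--     return "unknown"
-- ===== SOURCE B (Python) =====
-- # Single left-to-right scan over the text: at each position, record the best
-- # (lowest) priority of any keyword starting there; resolve by priority at the end.
-- _KEYWORD_PRIORITY = {
--     "poor sleep": 0, "bad sleep": 0, "tired": 0, "sleep": 0,
--     "high risk": 1, "at risk": 1, "injury risk": 1,
--     "readiness": 2, "ready": 2,
--     "compare position": 3, "position comparison": 3,
--     "back to back": 4, "back-to-back": 4, "b2b": 4, "schedule": 4, "rest": 4,
-- }
-- _LABELS = ["poor_sleep", "high_risk", "readiness", "position_comparison", "back_to_back"]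
--
-- def _parse(text):
--     t = text.lower().strip()
--     best = 5
--     for i in range(len(t) + 1):
--         for kw, pri in _KEYWORD_PRIORITY.items():
--             if pri < best and t.startswith(kw, i):
--                 best = pri
--     return _LABELS[best] if best < 5 else "unknown"
-- ===== Notes on version B (the rewrite author's own statement) =====
-- stated objective: alternative
-- what changed: Instead of testing each keyword group for substring containment in priority order, B makes one left-to-right scan over the text, at every position checking which keywords start there via startswith and keeping the minimum priority seen; the label of the minimum matched priority is returned (unknown if none).
import Mathlib
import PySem

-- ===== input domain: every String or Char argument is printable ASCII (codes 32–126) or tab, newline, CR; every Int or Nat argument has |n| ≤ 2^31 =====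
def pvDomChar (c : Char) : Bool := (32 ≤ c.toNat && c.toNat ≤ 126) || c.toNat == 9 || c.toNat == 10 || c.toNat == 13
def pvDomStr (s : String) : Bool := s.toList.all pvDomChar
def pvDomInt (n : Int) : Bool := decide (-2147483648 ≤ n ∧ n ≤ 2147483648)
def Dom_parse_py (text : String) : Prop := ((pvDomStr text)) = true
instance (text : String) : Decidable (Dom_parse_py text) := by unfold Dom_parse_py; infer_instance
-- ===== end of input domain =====

-- B replaces A's priority-ordered substring tests by a single left-to-right scan of the
-- text keeping the minimum priority of any keyword starting at each position (alternative).

-- ===== PORT A =====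
def parse_py (text : String) : String :=
  let t := PySem.Str.strip (PySem.Str.lower text)
  if ["poor sleep", "bad sleep", "tired", "sleep"].any (fun w => PySem.Str.isIn w t) then "poor_sleep"
  else if ["high risk", "at risk", "injury risk"].any (fun w => PySem.Str.isIn w t) then "high_risk"
  else if ["readiness", "ready"].any (fun w => PySem.Str.isIn w t) then "readiness"
  else if PySem.Str.isIn "compare position" t || PySem.Str.isIn "position comparison" t then "position_comparison"
  else if ["back to back", "back-to-back", "b2b", "schedule", "rest"].any (fun w => PySem.Str.isIn w t) then "back_to_back"
  else "unknown"

-- ===== PORT B =====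
def pvKW : List (String × Nat) :=
  [("poor sleep", 0), ("bad sleep", 0), ("tired", 0), ("sleep", 0),
   ("high risk", 1), ("at risk", 1), ("injury risk", 1),
   ("readiness", 2), ("ready", 2),
   ("compare position", 3), ("position comparison", 3),
   ("back to back", 4), ("back-to-back", 4), ("b2b", 4), ("schedule", 4), ("rest", 4)]

def pvLabels : List String :=
  ["poor_sleep", "high_risk", "readiness", "position_comparison", "back_to_back"]

-- inner loop at position i; Python's t.startswith(kw, i) with 0 ≤ i ≤ len(t) is exactly
-- 'kw.toList is a prefix of (t.toList.drop i)' (ported via PySem.Chars.startswith).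
def pvScanAt (t : List Char) (i : Nat) (best : Nat) : Nat :=
  pvKW.foldl (fun b kv =>
    if kv.2 < b ∧ PySem.Chars.startswith (t.drop i) kv.1.toList = true then kv.2 else b) best

def parse_py_alt (text : String) : String :=
  let t := (PySem.Str.strip (PySem.Str.lower text)).toList
  let best := (List.range (t.length + 1)).foldl (fun b i => pvScanAt t i b) 5
  if best < 5 then pvLabels.getD best "unknown" else "unknown"

-- ===== PRECONDITION & SPEC =====
def Spec_parse_py (text : String) (out : String) : Prop := out = parse_py_alt text
instance (text : String) (out : String) : Decidable (Spec_parse_py text out) := by unfold Spec_parse_py; infer_instance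

-- ===== CLAIM (what is proved, stated in full; the proofs are below) =====
def Claim_equal_parse_py : Prop := ∀ (text : String), Dom_parse_py text → Spec_parse_py text (parse_py text)

-- ===== LEMMAS AND PROOFS =====

def pvM0 (u : List Char) : Prop :=
  "poor sleep".toList <:+: u ∨ "bad sleep".toList <:+: u ∨ "tired".toList <:+: u ∨ "sleep".toList <:+: u
def pvM1 (u : List Char) : Prop :=
  "high risk".toList <:+: u ∨ "at risk".toList <:+: u ∨ "injury risk".toList <:+: u
def pvM2 (u : List Char) : Prop :=
  "readiness".toList <:+: u ∨ "ready".toList <:+: u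
def pvM3 (u : List Char) : Prop :=
  "compare position".toList <:+: u ∨ "position comparison".toList <:+: u
def pvM4 (u : List Char) : Prop :=
  "back to back".toList <:+: u ∨ "back-to-back".toList <:+: u ∨ "b2b".toList <:+: u ∨
  "schedule".toList <:+: u ∨ "rest".toList <:+: u

-- inner fold facts
theorem pv_inner_le_init (u : List Char) (i : Nat) (l : List (String × Nat)) (b : Nat) :
    l.foldl (fun b kv =>
      if kv.2 < b ∧ PySem.Chars.startswith (u.drop i) kv.1.toList = true then kv.2 else b) b ≤ b := by
  induction l generalizing b with
  | nil => simp
  | cons x xs ih =>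
    simp only [List.foldl_cons]
    refine le_trans (ih _) ?_
    split_ifs with h
    · exact Nat.le_of_lt h.1
    · exact le_rfl

theorem pv_inner_mem (u : List Char) (i : Nat) (l : List (String × Nat)) (b : Nat) :
    l.foldl (fun b kv =>
      if kv.2 < b ∧ PySem.Chars.startswith (u.drop i) kv.1.toList = true then kv.2 else b) b = b ∨
    ∃ kv ∈ l, PySem.Chars.startswith (u.drop i) kv.1.toList = true ∧
      l.foldl (fun b kv =>
        if kv.2 < b ∧ PySem.Chars.startswith (u.drop i) kv.1.toList = true then kv.2 else b) b = kv.2 := by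
  induction l generalizing b with
  | nil => left; simp
  | cons x xs ih =>
    simp only [List.foldl_cons]
    rcases ih (if x.2 < b ∧ PySem.Chars.startswith (u.drop i) x.1.toList = true then x.2 else b) with h | ⟨kv, hm, hs, hr⟩
    · rw [h]
      split_ifs at h ⊢ with hc
      · exact Or.inr ⟨x, List.mem_cons_self .., hc.2, rfl⟩
      · exact Or.inl rfl
    · exact Or.inr ⟨kv, List.mem_cons_of_mem _ hm, hs, hr⟩

theorem pv_inner_le_of_mem (u : List Char) (i : Nat) (l : List (String × Nat))
    (kv : String × Nat) :
    ∀ b : Nat, kv ∈ l → PySem.Chars.startswith (u.drop i) kv.1.toList = true →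
    l.foldl (fun b kv =>
      if kv.2 < b ∧ PySem.Chars.startswith (u.drop i) kv.1.toList = true then kv.2 else b) b ≤ kv.2 := by
  induction l with
  | nil => intro b hm _; cases hm
  | cons x xs ih =>
    intro b hm hs
    simp only [List.foldl_cons]
    rcases List.mem_cons.mp hm with rfl | hm'
    · refine le_trans (pv_inner_le_init u i xs _) ?_
      split_ifs with h
      · exact le_rfl
      · have : ¬ kv.2 < b := fun hlt => h ⟨hlt, hs⟩
        omega
    · exact ih _ hm' hs

theorem pvScanAt_le (u : List Char) (i b : Nat) : pvScanAt u i b ≤ b := by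
  unfold pvScanAt; exact pv_inner_le_init u i pvKW b

theorem pvScanAt_mem (u : List Char) (i b : Nat) :
    pvScanAt u i b = b ∨
    ∃ kv ∈ pvKW, PySem.Chars.startswith (u.drop i) kv.1.toList = true ∧ pvScanAt u i b = kv.2 := by
  unfold pvScanAt; exact pv_inner_mem u i pvKW b

theorem pvScanAt_le_of_mem (u : List Char) (i b : Nat) (kv : String × Nat)
    (hm : kv ∈ pvKW) (hs : PySem.Chars.startswith (u.drop i) kv.1.toList = true) :
    pvScanAt u i b ≤ kv.2 := by
  unfold pvScanAt; exact pv_inner_le_of_mem u i pvKW kv b hm hs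

-- outer fold facts
theorem pv_outer_le_init (u : List Char) (l : List Nat) (b : Nat) :
    l.foldl (fun b i => pvScanAt u i b) b ≤ b := by
  induction l generalizing b with
  | nil => simp
  | cons x xs ih =>
    simp only [List.foldl_cons]
    exact le_trans (ih _) (pvScanAt_le u x b)

theorem pv_outer_mem (u : List Char) (l : List Nat) (b : Nat) :
    l.foldl (fun b i => pvScanAt u i b) b = b ∨
    ∃ i ∈ l, ∃ kv ∈ pvKW, PySem.Chars.startswith (u.drop i) kv.1.toList = true ∧
      l.foldl (fun b i => pvScanAt u i b) b = kv.2 := by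
  induction l generalizing b with
  | nil => left; simp
  | cons x xs ih =>
    simp only [List.foldl_cons]
    rcases ih (pvScanAt u x b) with h | ⟨i, hi, kv, hm, hs, hr⟩
    · rw [h]
      rcases pvScanAt_mem u x b with h2 | ⟨kv, hm, hs, hr⟩
      · exact Or.inl h2
      · exact Or.inr ⟨x, List.mem_cons_self .., kv, hm, hs, hr⟩
    · exact Or.inr ⟨i, List.mem_cons_of_mem _ hi, kv, hm, hs, hr⟩

theorem pv_outer_le_of_mem (u : List Char) (l : List Nat)
    (i : Nat) (kv : String × Nat) (hm : kv ∈ pvKW)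
    (hs : PySem.Chars.startswith (u.drop i) kv.1.toList = true) :
    ∀ b : Nat, i ∈ l → l.foldl (fun b i => pvScanAt u i b) b ≤ kv.2 := by
  induction l with
  | nil => intro b hi; cases hi
  | cons x xs ih =>
    intro b hi
    simp only [List.foldl_cons]
    rcases List.mem_cons.mp hi with rfl | hi'
    · exact le_trans (pv_outer_le_init u xs _) (pvScanAt_le_of_mem u i b kv hm hs)
    · exact ih _ hi'

-- bridge: bounded position scan ↔ substring occurrence (for nonempty keywords)
theorem pv_exists_drop_iff (u : List Char) (w : String) (hw : w.toList ≠ []) :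
    (∃ i ∈ List.range (u.length + 1), PySem.Chars.startswith (u.drop i) w.toList = true) ↔
      w.toList <:+: u := by
  constructor
  · rintro ⟨i, _, hs⟩
    exact (PySem.Chars.isIn_iff_infix w.toList u).mp
      ((PySem.Chars.exists_prefix_drop_iff_isIn w.toList u).mp
        ⟨i, (PySem.Chars.startswith_iff _ _).mp hs⟩)
  · intro hinf
    rcases (PySem.Chars.exists_prefix_drop_iff_isIn w.toList u).mpr
      ((PySem.Chars.isIn_iff_infix w.toList u).mpr hinf) with ⟨j, hj⟩
    by_cases hle : j ≤ u.length
    · exact ⟨j, List.mem_range.mpr (by omega), (PySem.Chars.startswith_iff _ _).mpr hj⟩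
    · exfalso
      have hnil : u.drop j = [] := List.drop_eq_nil_of_le (by omega)
      rw [hnil] at hj
      exact hw (List.prefix_nil.mp hj)

-- every matched keyword certifies its group's predicate
theorem pv_hit_class (u : List Char) (kv : String × Nat) (hm : kv ∈ pvKW)
    (hinf : kv.1.toList <:+: u) :
    (kv.2 = 0 ∧ pvM0 u) ∨ (kv.2 = 1 ∧ pvM1 u) ∨ (kv.2 = 2 ∧ pvM2 u) ∨
    (kv.2 = 3 ∧ pvM3 u) ∨ (kv.2 = 4 ∧ pvM4 u) := by
  fin_cases hm <;> simp_all [pvM0, pvM1, pvM2, pvM3, pvM4]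

-- a group hit bounds the scan's best value from above
theorem pv_best_le (u : List Char) (w : String) (p : Nat) (hm : (w, p) ∈ pvKW)
    (hw : w.toList ≠ []) (hinf : w.toList <:+: u) :
    (List.range (u.length + 1)).foldl (fun b i => pvScanAt u i b) 5 ≤ p := by
  rcases (pv_exists_drop_iff u w hw).mpr hinf with ⟨i, hi, hs⟩
  exact pv_outer_le_of_mem u _ i (w, p) hm hs 5 hi

-- the scan's result is 5 or a matched priority
theorem pv_best_cases (u : List Char) :
    (List.range (u.length + 1)).foldl (fun b i => pvScanAt u i b) 5 = 5 ∨
    ((List.range (u.length + 1)).foldl (fun b i => pvScanAt u i b) 5 = 0 ∧ pvM0 u) ∨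
    ((List.range (u.length + 1)).foldl (fun b i => pvScanAt u i b) 5 = 1 ∧ pvM1 u) ∨
    ((List.range (u.length + 1)).foldl (fun b i => pvScanAt u i b) 5 = 2 ∧ pvM2 u) ∨
    ((List.range (u.length + 1)).foldl (fun b i => pvScanAt u i b) 5 = 3 ∧ pvM3 u) ∨
    ((List.range (u.length + 1)).foldl (fun b i => pvScanAt u i b) 5 = 4 ∧ pvM4 u) := by
  rcases pv_outer_mem u (List.range (u.length + 1)) 5 with h | ⟨i, hi, kv, hm, hs, hr⟩
  · exact Or.inl h
  · have hinf : kv.1.toList <:+: u := by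
      refine (pv_exists_drop_iff u kv.1 ?_).mp ⟨i, hi, hs⟩
      fin_cases hm <;> decide
    rcases pv_hit_class u kv hm hinf with ⟨h0, hM⟩ | ⟨h0, hM⟩ | ⟨h0, hM⟩ | ⟨h0, hM⟩ | ⟨h0, hM⟩ <;>
      simp_all

theorem pv_best_eq0 (u : List Char) (h0 : pvM0 u) :
    (List.range (u.length + 1)).foldl (fun b i => pvScanAt u i b) 5 = 0 := by
  rcases h0 with h | h | h | h <;>
    exact Nat.le_antisymm (pv_best_le u _ 0 (by simp [pvKW]) (by decide) h) (Nat.zero_le _)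

theorem pv_best_eq1 (u : List Char) (h0 : ¬ pvM0 u) (h1 : pvM1 u) :
    (List.range (u.length + 1)).foldl (fun b i => pvScanAt u i b) 5 = 1 := by
  refine Nat.le_antisymm ?_ ?_
  · rcases h1 with h | h | h <;> exact pv_best_le u _ 1 (by simp [pvKW]) (by decide) h
  · rcases pv_best_cases u with h | ⟨_, hM⟩ | ⟨hv, _⟩ | ⟨hv, _⟩ | ⟨hv, _⟩ | ⟨hv, _⟩
    · omega
    · exact absurd hM h0
    all_goals omega

theorem pv_best_eq2 (u : List Char) (h0 : ¬ pvM0 u) (h1 : ¬ pvM1 u) (h2 : pvM2 u) :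
    (List.range (u.length + 1)).foldl (fun b i => pvScanAt u i b) 5 = 2 := by
  refine Nat.le_antisymm ?_ ?_
  · rcases h2 with h | h <;> exact pv_best_le u _ 2 (by simp [pvKW]) (by decide) h
  · rcases pv_best_cases u with h | ⟨_, hM⟩ | ⟨_, hM⟩ | ⟨hv, _⟩ | ⟨hv, _⟩ | ⟨hv, _⟩
    · omega
    · exact absurd hM h0
    · exact absurd hM h1
    all_goals omega

theorem pv_best_eq3 (u : List Char) (h0 : ¬ pvM0 u) (h1 : ¬ pvM1 u) (h2 : ¬ pvM2 u) (h3 : pvM3 u) :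
    (List.range (u.length + 1)).foldl (fun b i => pvScanAt u i b) 5 = 3 := by
  refine Nat.le_antisymm ?_ ?_
  · rcases h3 with h | h <;> exact pv_best_le u _ 3 (by simp [pvKW]) (by decide) h
  · rcases pv_best_cases u with h | ⟨_, hM⟩ | ⟨_, hM⟩ | ⟨_, hM⟩ | ⟨hv, _⟩ | ⟨hv, _⟩
    · omega
    · exact absurd hM h0
    · exact absurd hM h1
    · exact absurd hM h2
    all_goals omega

theorem pv_best_eq4 (u : List Char) (h0 : ¬ pvM0 u) (h1 : ¬ pvM1 u) (h2 : ¬ pvM2 u)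
    (h3 : ¬ pvM3 u) (h4 : pvM4 u) :
    (List.range (u.length + 1)).foldl (fun b i => pvScanAt u i b) 5 = 4 := by
  refine Nat.le_antisymm ?_ ?_
  · rcases h4 with h | h | h | h | h <;> exact pv_best_le u _ 4 (by simp [pvKW]) (by decide) h
  · rcases pv_best_cases u with h | ⟨_, hM⟩ | ⟨_, hM⟩ | ⟨_, hM⟩ | ⟨_, hM⟩ | ⟨hv, _⟩
    · omega
    · exact absurd hM h0
    · exact absurd hM h1
    · exact absurd hM h2
    · exact absurd hM h3
    · omega

theorem pv_best_eq5 (u : List Char) (h0 : ¬ pvM0 u) (h1 : ¬ pvM1 u) (h2 : ¬ pvM2 u)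
    (h3 : ¬ pvM3 u) (h4 : ¬ pvM4 u) :
    (List.range (u.length + 1)).foldl (fun b i => pvScanAt u i b) 5 = 5 := by
  rcases pv_best_cases u with h | ⟨_, hM⟩ | ⟨_, hM⟩ | ⟨_, hM⟩ | ⟨_, hM⟩ | ⟨_, hM⟩
  · exact h
  · exact absurd hM h0
  · exact absurd hM h1
  · exact absurd hM h2
  · exact absurd hM h3
  · exact absurd hM h4

theorem pv_any0 (t : String) :
    (["poor sleep", "bad sleep", "tired", "sleep"].any (fun w => PySem.Str.isIn w t)) = true ↔ pvM0 t.toList := by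
  simp [pvM0, PySem.Str.isIn_iff_infix, PySem.Chars.isIn_iff_infix]
theorem pv_any1 (t : String) :
    (["high risk", "at risk", "injury risk"].any (fun w => PySem.Str.isIn w t)) = true ↔ pvM1 t.toList := by
  simp [pvM1, PySem.Str.isIn_iff_infix, PySem.Chars.isIn_iff_infix]
theorem pv_any2 (t : String) :
    (["readiness", "ready"].any (fun w => PySem.Str.isIn w t)) = true ↔ pvM2 t.toList := by
  simp [pvM2, PySem.Str.isIn_iff_infix, PySem.Chars.isIn_iff_infix]
theorem pv_any3 (t : String) :
    (PySem.Str.isIn "compare position" t || PySem.Str.isIn "position comparison" t) = true ↔ pvM3 t.toList := by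
  simp [pvM3, PySem.Str.isIn_iff_infix, PySem.Chars.isIn_iff_infix]
theorem pv_any4 (t : String) :
    (["back to back", "back-to-back", "b2b", "schedule", "rest"].any (fun w => PySem.Str.isIn w t)) = true ↔ pvM4 t.toList := by
  simp [pvM4, PySem.Str.isIn_iff_infix, PySem.Chars.isIn_iff_infix]

theorem pv_main (text : String) : parse_py text = parse_py_alt text := by
  by_cases h0 : pvM0 (PySem.Str.strip (PySem.Str.lower text)).toList
  · simp only [parse_py, parse_py_alt, pv_any0, h0, ite_true,
      pv_best_eq0 _ h0]
    rfl
  by_cases h1 : pvM1 (PySem.Str.strip (PySem.Str.lower text)).toList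
  · simp only [parse_py, parse_py_alt, pv_any0, pv_any1, h0, h1, ite_true, ite_false,
      pv_best_eq1 _ h0 h1]
    rfl
  by_cases h2 : pvM2 (PySem.Str.strip (PySem.Str.lower text)).toList
  · simp only [parse_py, parse_py_alt, pv_any0, pv_any1, pv_any2, h0, h1, h2, ite_true, ite_false,
      pv_best_eq2 _ h0 h1 h2]
    rfl
  by_cases h3 : pvM3 (PySem.Str.strip (PySem.Str.lower text)).toList
  · simp only [parse_py, parse_py_alt, pv_any0, pv_any1, pv_any2, pv_any3, h0, h1, h2, h3,
      ite_true, ite_false, pv_best_eq3 _ h0 h1 h2 h3]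
    rfl
  by_cases h4 : pvM4 (PySem.Str.strip (PySem.Str.lower text)).toList
  · simp only [parse_py, parse_py_alt, pv_any0, pv_any1, pv_any2, pv_any3, pv_any4,
      h0, h1, h2, h3, h4, ite_true, ite_false, pv_best_eq4 _ h0 h1 h2 h3 h4]
    rfl
  · simp only [parse_py, parse_py_alt, pv_any0, pv_any1, pv_any2, pv_any3, pv_any4,
      h0, h1, h2, h3, h4, ite_true, ite_false, pv_best_eq5 _ h0 h1 h2 h3 h4]
    rfl

-- ===== VERDICT (by name: the statement is the Claim_ definition above) =====
theorem parse_py_spec : Claim_equal_parse_py := by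
  intro text _
  unfold Spec_parse_py
  exact pv_main text
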